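-- pv_equiv track=rewrite | github.com/MinaKhamesi/Problem-solving-questions | Hard/SameBSTs.py | areSame
-- ===== SOURCE A (Python) =====
-- def areSame(arrayOne, arrayTwo,idxOne, idxTwo, lowerBound, upperBound):
--
--     if idxOne == -1 or idxTwo == -1:
--         return idxOne == idxTwo
--
--     if arrayOne[idxOne] != arrayTwo[idxTwo]: return False
--
--     leftChildIdxOne = getLeftChildIdx(arrayOne, idxOne, lowerBound)
--     leftChildIdxTwo = getLeftChildIdx(arrayTwo, idxTwo, lowerBound)
--     rightChildIdxOne = getRightChildIdx(arrayOne, idxOne, upperBound)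
--     rightChildIdxTwo = getRightChildIdx(arrayTwo, idxTwo, upperBound)
--
--     currentValue = arrayOne[idxOne]
--
--     isLeftTheSame = areSame(arrayOne, arrayTwo , leftChildIdxOne, leftChildIdxTwo, lowerBound, currentValue)
--
--     isRightTheSame = areSame(arrayOne, arrayTwo, rightChildIdxOne, rightChildIdxTwo, currentValue, upperBound)
--
--     return  isLeftTheSame  and  isRightTheSame
--
-- def getLeftChildIdx(array, idx, lowerBound):
--     for i in range(idx + 1, len(array)):
--         if array[i] < array[idx] and array[i] >= lowerBound:
--             return i
--     return -1
--
-- def getRightChildIdx(array, idx, upperBound):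
--     for i in range(idx + 1, len(array)):
--         if array[i] >= array[idx] and array[i] < upperBound:
--             return i
--     return -1
-- ===== SOURCE B (Python) =====
-- def areSame(arrayOne, arrayTwo, idxOne, idxTwo, lowerBound, upperBound):
--     if idxOne == -1 or idxTwo == -1:
--         return idxOne == idxTwo
--
--     cur = arrayOne[idxOne]
--     if cur != arrayTwo[idxTwo]:
--         return False
--
--     rest1 = arrayOne[idxOne + 1:]
--     rest2 = arrayTwo[idxTwo + 1:]
--     left1 = [x for x in rest1 if lowerBound <= x < cur]
--     left2 = [x for x in rest2 if lowerBound <= x < cur]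
--     right1 = [x for x in rest1 if cur <= x < upperBound]
--     right2 = [x for x in rest2 if cur <= x < upperBound]
--
--     return (areSame(left1, left2, 0 if left1 else -1, 0 if left2 else -1, lowerBound, cur)
--             and areSame(right1, right2, 0 if right1 else -1, 0 if right2 else -1, cur, upperBound))
-- ===== Notes on version B (the rewrite author's own statement) =====
-- stated objective: alternative
-- what changed: Replaces A's index-scanning helpers (getLeftChildIdx/getRightChildIdx searching the original arrays for the next in-bounds index) by explicit partitioning: each call slices off the suffix after the current node and filters it into the left [lowerBound,cur) and right [cur,upperBound) sublists, recursing on the sublists with index 0/-1 instead of on the original arrays with scanned indices.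
-- outside the precondition, e.g. on areSame([3, -3, 2], [2, 3, 0, 3], -3, 3, 2, -1): A returns True, B returns False; on areSame([1, 2], [1, 2], 5, 0, -10, 10): A raises IndexError, B raises IndexError
import Mathlib
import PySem

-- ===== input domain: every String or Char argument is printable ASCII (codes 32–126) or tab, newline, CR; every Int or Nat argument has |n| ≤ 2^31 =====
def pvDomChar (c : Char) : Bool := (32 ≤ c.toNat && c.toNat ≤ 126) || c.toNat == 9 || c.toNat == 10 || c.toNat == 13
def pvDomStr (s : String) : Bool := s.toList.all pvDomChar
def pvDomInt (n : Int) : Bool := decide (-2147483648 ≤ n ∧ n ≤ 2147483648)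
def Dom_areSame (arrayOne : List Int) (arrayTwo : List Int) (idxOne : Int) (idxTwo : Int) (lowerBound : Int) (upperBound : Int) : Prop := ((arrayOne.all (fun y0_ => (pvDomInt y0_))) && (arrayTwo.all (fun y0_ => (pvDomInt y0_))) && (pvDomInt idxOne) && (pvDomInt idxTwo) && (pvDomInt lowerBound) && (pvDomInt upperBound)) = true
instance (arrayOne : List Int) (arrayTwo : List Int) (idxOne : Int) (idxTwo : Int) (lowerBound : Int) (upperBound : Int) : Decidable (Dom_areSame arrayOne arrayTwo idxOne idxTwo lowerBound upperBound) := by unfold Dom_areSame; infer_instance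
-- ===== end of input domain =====

-- B replaces A's next-index scans over the original arrays by explicit partitioning of the
-- suffix after the current node into bounded sublists (objective: alternative, not faster).
-- Both ports encode their Python's well-founded recursion structurally, with fuel equal to the
-- exact termination measure (pvFuelA / pvFuelB); the fuel is always sufficient, see the
-- *_unfold lemmas below.

-- ===== PORT A =====
def getLeftChildIdx (array : List Int) (idx : Int) (lowerBound : Int) : Int :=
  match (PySem.List.pyRange (idx + 1) (array.length : Int) 1).find?
      (fun i => decide (PySem.List.pyGetD array i 0 < PySem.List.pyGetD array idx 0) &&
                decide (PySem.List.pyGetD array i 0 ≥ lowerBound)) with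
  | some i => i
  | none => -1

def getRightChildIdx (array : List Int) (idx : Int) (upperBound : Int) : Int :=
  match (PySem.List.pyRange (idx + 1) (array.length : Int) 1).find?
      (fun i => decide (PySem.List.pyGetD array i 0 ≥ PySem.List.pyGetD array idx 0) &&
                decide (PySem.List.pyGetD array i 0 < upperBound)) with
  | some i => i
  | none => -1

-- exact recursion-depth measure of A's call tree
def pvFuelA (a1 a2 : List Int) (i1 i2 : Int) : Nat :=
  if i1 = -1 ∨ i2 = -1 then 0
  else ((a1.length : Int) - i1).toNat + ((a2.length : Int) - i2).toNat + 1

def areSameGo : Nat → List Int → List Int → Int → Int → Int → Int → Bool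
  | 0, _, _, i1, i2, _, _ => i1 == i2   -- fuel 0 only at measure 0, i.e. in the i1/i2 = -1 guard
  | fuel + 1, arrayOne, arrayTwo, idxOne, idxTwo, lowerBound, upperBound =>
    if idxOne = -1 ∨ idxTwo = -1 then idxOne == idxTwo
    else if PySem.List.pyGetD arrayOne idxOne 0 ≠ PySem.List.pyGetD arrayTwo idxTwo 0 then false
    else
      areSameGo fuel arrayOne arrayTwo
        (getLeftChildIdx arrayOne idxOne lowerBound) (getLeftChildIdx arrayTwo idxTwo lowerBound)
        lowerBound (PySem.List.pyGetD arrayOne idxOne 0) &&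
      areSameGo fuel arrayOne arrayTwo
        (getRightChildIdx arrayOne idxOne upperBound) (getRightChildIdx arrayTwo idxTwo upperBound)
        (PySem.List.pyGetD arrayOne idxOne 0) upperBound

def areSame (arrayOne : List Int) (arrayTwo : List Int) (idxOne : Int) (idxTwo : Int) (lowerBound : Int) (upperBound : Int) : Bool :=
  areSameGo (pvFuelA arrayOne arrayTwo idxOne idxTwo) arrayOne arrayTwo idxOne idxTwo lowerBound upperBound

-- ===== PORT B =====
-- exact recursion-depth measure of B's call tree
def pvFuelB (a1 a2 : List Int) (i1 i2 : Int) : Nat :=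
  if i1 = -1 ∨ i2 = -1 then 0
  else a1.length + a2.length + (if i1 < 0 then 1 else 0) + (if i2 < 0 then 1 else 0) + 1

def areSameAltGo : Nat → List Int → List Int → Int → Int → Int → Int → Bool
  | 0, _, _, i1, i2, _, _ => i1 == i2   -- fuel 0 only at measure 0, i.e. in the i1/i2 = -1 guard
  | fuel + 1, arrayOne, arrayTwo, idxOne, idxTwo, lowerBound, upperBound =>
    if idxOne = -1 ∨ idxTwo = -1 then idxOne == idxTwo
    else if PySem.List.pyGetD arrayOne idxOne 0 ≠ PySem.List.pyGetD arrayTwo idxTwo 0 then false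
    else
      areSameAltGo fuel
        ((PySem.List.slice arrayOne (some (idxOne + 1)) none).filter
          (fun x => decide (lowerBound ≤ x) && decide (x < PySem.List.pyGetD arrayOne idxOne 0)))
        ((PySem.List.slice arrayTwo (some (idxTwo + 1)) none).filter
          (fun x => decide (lowerBound ≤ x) && decide (x < PySem.List.pyGetD arrayOne idxOne 0)))
        (if ((PySem.List.slice arrayOne (some (idxOne + 1)) none).filter
          (fun x => decide (lowerBound ≤ x) && decide (x < PySem.List.pyGetD arrayOne idxOne 0))).isEmpty then -1 else 0)
        (if ((PySem.List.slice arrayTwo (some (idxTwo + 1)) none).filter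
          (fun x => decide (lowerBound ≤ x) && decide (x < PySem.List.pyGetD arrayOne idxOne 0))).isEmpty then -1 else 0)
        lowerBound (PySem.List.pyGetD arrayOne idxOne 0) &&
      areSameAltGo fuel
        ((PySem.List.slice arrayOne (some (idxOne + 1)) none).filter
          (fun x => decide (PySem.List.pyGetD arrayOne idxOne 0 ≤ x) && decide (x < upperBound)))
        ((PySem.List.slice arrayTwo (some (idxTwo + 1)) none).filter
          (fun x => decide (PySem.List.pyGetD arrayOne idxOne 0 ≤ x) && decide (x < upperBound)))
        (if ((PySem.List.slice arrayOne (some (idxOne + 1)) none).filter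
          (fun x => decide (PySem.List.pyGetD arrayOne idxOne 0 ≤ x) && decide (x < upperBound))).isEmpty then -1 else 0)
        (if ((PySem.List.slice arrayTwo (some (idxTwo + 1)) none).filter
          (fun x => decide (PySem.List.pyGetD arrayOne idxOne 0 ≤ x) && decide (x < upperBound))).isEmpty then -1 else 0)
        (PySem.List.pyGetD arrayOne idxOne 0) upperBound

def areSame_alt (arrayOne : List Int) (arrayTwo : List Int) (idxOne : Int) (idxTwo : Int) (lowerBound : Int) (upperBound : Int) : Bool :=
  areSameAltGo (pvFuelB arrayOne arrayTwo idxOne idxTwo) arrayOne arrayTwo idxOne idxTwo lowerBound upperBound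

-- ===== PRECONDITION & SPEC =====
-- Pre_ excludes top-level indices other than -1 or an in-range non-negative position: Python
-- raises IndexError for fully out-of-range indices, and for wrap indices < -1 A's value is an
-- accident of negative-index wraparound inside its range scans (cites in claim.json).
def Pre_areSame (arrayOne : List Int) (arrayTwo : List Int) (idxOne : Int) (idxTwo : Int) (lowerBound : Int) (upperBound : Int) : Prop :=
  (idxOne = -1 ∨ (0 ≤ idxOne ∧ idxOne < (arrayOne.length : Int))) ∧
  (idxTwo = -1 ∨ (0 ≤ idxTwo ∧ idxTwo < (arrayTwo.length : Int)))
instance (arrayOne : List Int) (arrayTwo : List Int) (idxOne : Int) (idxTwo : Int) (lowerBound : Int) (upperBound : Int) : Decidable (Pre_areSame arrayOne arrayTwo idxOne idxTwo lowerBound upperBound) := by unfold Pre_areSame; infer_instance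

def pvWitness_areSame : List Int × List Int × Int × Int × Int × Int := ([2, 1, 3], [2, 3, 1], 0, 0, -10, 10)

def Spec_areSame (arrayOne : List Int) (arrayTwo : List Int) (idxOne : Int) (idxTwo : Int) (lowerBound : Int) (upperBound : Int) (out : Bool) : Prop := out = areSame_alt arrayOne arrayTwo idxOne idxTwo lowerBound upperBound
instance (arrayOne : List Int) (arrayTwo : List Int) (idxOne : Int) (idxTwo : Int) (lowerBound : Int) (upperBound : Int) (out : Bool) : Decidable (Spec_areSame arrayOne arrayTwo idxOne idxTwo lowerBound upperBound out) := by unfold Spec_areSame; infer_instance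

-- ===== CLAIM (what is proved, stated in full; the proofs are below) =====
def Claim_equal_areSame : Prop := ∀ (arrayOne : List Int) (arrayTwo : List Int) (idxOne : Int) (idxTwo : Int) (lowerBound : Int) (upperBound : Int), Dom_areSame arrayOne arrayTwo idxOne idxTwo lowerBound upperBound → Pre_areSame arrayOne arrayTwo idxOne idxTwo lowerBound upperBound → Spec_areSame arrayOne arrayTwo idxOne idxTwo lowerBound upperBound (areSame arrayOne arrayTwo idxOne idxTwo lowerBound upperBound)

-- ===== LEMMAS AND PROOFS =====

-- bounds on the scan results
lemma find?_pyRange_one_bound {s e j : Int} {p : Int → Bool}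
    (h : (PySem.List.pyRange s e 1).find? p = some j) : s ≤ j ∧ j < e :=
  PySem.List.mem_pyRange_one.mp (List.mem_of_find?_eq_some h)

lemma getLeftChildIdx_bound (a : List Int) (idx lo : Int) :
    getLeftChildIdx a idx lo = -1 ∨
      (idx < getLeftChildIdx a idx lo ∧ getLeftChildIdx a idx lo < (a.length : Int)) := by
  unfold getLeftChildIdx
  cases hf : (PySem.List.pyRange (idx + 1) (a.length : Int) 1).find?
      (fun i => decide (PySem.List.pyGetD a i 0 < PySem.List.pyGetD a idx 0) &&
                decide (PySem.List.pyGetD a i 0 ≥ lo)) with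
  | none => exact Or.inl rfl
  | some j =>
      have h := find?_pyRange_one_bound hf
      right
      constructor <;> simp <;> omega

lemma getRightChildIdx_bound (a : List Int) (idx hi : Int) :
    getRightChildIdx a idx hi = -1 ∨
      (idx < getRightChildIdx a idx hi ∧ getRightChildIdx a idx hi < (a.length : Int)) := by
  unfold getRightChildIdx
  cases hf : (PySem.List.pyRange (idx + 1) (a.length : Int) 1).find?
      (fun i => decide (PySem.List.pyGetD a i 0 ≥ PySem.List.pyGetD a idx 0) &&
                decide (PySem.List.pyGetD a i 0 < hi)) with
  | none => exact Or.inl rfl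
  | some j =>
      have h := find?_pyRange_one_bound hf
      right
      constructor <;> simp <;> omega

-- a non-empty filtered sublist cut after index i ≠ -1 is short enough for B's measure to drop
lemma pvSideBound (a : List Int) (i : Int) (p : Int → Bool) (hne1 : i ≠ -1)
    (hne : ((PySem.List.slice a (some (i + 1)) none).filter p).isEmpty = false) :
    ((PySem.List.slice a (some (i + 1)) none).filter p).length + 1 ≤
      a.length + (if i < 0 then 1 else 0) := by
  have hnil : ((PySem.List.slice a (some (i + 1)) none).filter p) ≠ [] := by
    simpa using hne
  have hfl := List.length_pos_of_ne_nil hnil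
  have hle := List.length_filter_le p (PySem.List.slice a (some (i + 1)) none)
  by_cases h0 : 0 ≤ i
  · have h1 : (0:Int) ≤ i + 1 := by omega
    rw [PySem.List.slice_from a h1] at hle hfl ⊢
    have hd : (a.drop ((i + 1).toNat)).length = a.length - (i + 1).toNat := by simp
    have ht : 1 ≤ (i + 1).toNat := by omega
    simp only [if_neg (by omega : ¬ i < 0)]
    omega
  · have hcl := PySem.List.clampIdx_le a.length (i + 1)
    rw [PySem.List.slice_some_none] at hle hfl ⊢
    have hd : (a.drop (PySem.List.clampIdx a.length (i + 1))).length
        = a.length - PySem.List.clampIdx a.length (i + 1) := by simp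
    simp only [if_pos (by omega : i < 0)]
    omega

-- A's fuel strictly drops towards the children
lemma pvFuelA_lt (a1 a2 : List Int) (i1 i2 c1 c2 : Int)
    (hg : ¬(i1 = -1 ∨ i2 = -1))
    (h1 : c1 = -1 ∨ (i1 < c1 ∧ c1 < (a1.length : Int)))
    (h2 : c2 = -1 ∨ (i2 < c2 ∧ c2 < (a2.length : Int))) :
    pvFuelA a1 a2 c1 c2 < pvFuelA a1 a2 i1 i2 := by
  unfold pvFuelA
  rw [if_neg hg]
  by_cases hc : c1 = -1 ∨ c2 = -1
  · rw [if_pos hc]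
    omega
  · rw [if_neg hc]
    rcases h1 with rfl | h1
    · exact absurd (Or.inl rfl) hc
    rcases h2 with rfl | h2
    · exact absurd (Or.inr rfl) hc
    omega

-- B's fuel strictly drops towards the children
lemma pvFuelB_lt (a1 a2 L1 L2 : List Int) (i1 i2 : Int)
    (hg : ¬(i1 = -1 ∨ i2 = -1))
    (c1 : L1.isEmpty = false → L1.length + 1 ≤ a1.length + (if i1 < 0 then 1 else 0))
    (c2 : L2.isEmpty = false → L2.length + 1 ≤ a2.length + (if i2 < 0 then 1 else 0)) :
    pvFuelB L1 L2 (if L1.isEmpty then -1 else 0) (if L2.isEmpty then -1 else 0)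
      < pvFuelB a1 a2 i1 i2 := by
  unfold pvFuelB
  rw [if_neg hg]
  cases hc1 : L1.isEmpty
  · cases hc2 : L2.isEmpty
    · have d1 := c1 hc1
      have d2 := c2 hc2
      norm_num
      omega
    · norm_num
  · norm_num

-- fuel-irrelevance for A's runner: any fuel at least the measure computes A's value
lemma pvGoA_congr : ∀ (f g : Nat) (a1 a2 : List Int) (i1 i2 lo hi : Int),
    pvFuelA a1 a2 i1 i2 ≤ f → pvFuelA a1 a2 i1 i2 ≤ g →
    areSameGo f a1 a2 i1 i2 lo hi = areSameGo g a1 a2 i1 i2 lo hi := by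
  intro f
  induction f with
  | zero =>
    intro g a1 a2 i1 i2 lo hi hf hg
    have hguard : i1 = -1 ∨ i2 = -1 := by
      by_contra hc
      unfold pvFuelA at hf
      rw [if_neg hc] at hf
      omega
    cases g with
    | zero => rfl
    | succ g =>
      simp only [areSameGo]
      rw [if_pos hguard]
  | succ f ihf =>
    intro g a1 a2 i1 i2 lo hi hf hg
    by_cases hguard : i1 = -1 ∨ i2 = -1
    · cases g with
      | zero => simp only [areSameGo]; rw [if_pos hguard]
      | succ g => simp only [areSameGo]; rw [if_pos hguard, if_pos hguard]
    · cases g with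
      | zero =>
        exfalso
        unfold pvFuelA at hg
        rw [if_neg hguard] at hg
        omega
      | succ g =>
        have hm1 : pvFuelA a1 a2 i1 i2
            = ((a1.length : Int) - i1).toNat + ((a2.length : Int) - i2).toNat + 1 := by
          unfold pvFuelA
          rw [if_neg hguard]
        simp only [areSameGo]
        rw [if_neg hguard, if_neg hguard]
        by_cases hv : PySem.List.pyGetD a1 i1 0 ≠ PySem.List.pyGetD a2 i2 0
        · rw [if_pos hv, if_pos hv]
        · rw [if_neg hv, if_neg hv]
          have hltL := pvFuelA_lt a1 a2 i1 i2 _ _ hguard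
            (getLeftChildIdx_bound a1 i1 lo) (getLeftChildIdx_bound a2 i2 lo)
          have hltR := pvFuelA_lt a1 a2 i1 i2 _ _ hguard
            (getRightChildIdx_bound a1 i1 hi) (getRightChildIdx_bound a2 i2 hi)
          rw [ihf g a1 a2 _ _ lo (PySem.List.pyGetD a1 i1 0) (by omega) (by omega),
              ihf g a1 a2 _ _ (PySem.List.pyGetD a1 i1 0) hi (by omega) (by omega)]

-- one-step unfolding of A's port, exactly A's Python body
lemma areSame_unfold (a1 a2 : List Int) (i1 i2 lo hi : Int) :
    areSame a1 a2 i1 i2 lo hi =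
      if i1 = -1 ∨ i2 = -1 then i1 == i2
      else if PySem.List.pyGetD a1 i1 0 ≠ PySem.List.pyGetD a2 i2 0 then false
      else
        areSame a1 a2 (getLeftChildIdx a1 i1 lo) (getLeftChildIdx a2 i2 lo)
          lo (PySem.List.pyGetD a1 i1 0) &&
        areSame a1 a2 (getRightChildIdx a1 i1 hi) (getRightChildIdx a2 i2 hi)
          (PySem.List.pyGetD a1 i1 0) hi := by
  by_cases hguard : i1 = -1 ∨ i2 = -1
  · rw [if_pos hguard]
    unfold areSame
    cases hm : pvFuelA a1 a2 i1 i2 with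
    | zero => simp only [areSameGo]
    | succ m =>
      simp only [areSameGo]
      rw [if_pos hguard]
  · rw [if_neg hguard]
    have hm1 : pvFuelA a1 a2 i1 i2
        = ((a1.length : Int) - i1).toNat + ((a2.length : Int) - i2).toNat + 1 := by
      unfold pvFuelA
      rw [if_neg hguard]
    unfold areSame
    rw [hm1]
    simp only [areSameGo]
    rw [if_neg hguard]
    by_cases hv : PySem.List.pyGetD a1 i1 0 ≠ PySem.List.pyGetD a2 i2 0
    · rw [if_pos hv, if_pos hv]
    · rw [if_neg hv, if_neg hv]
      have hltL := pvFuelA_lt a1 a2 i1 i2 _ _ hguard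
        (getLeftChildIdx_bound a1 i1 lo) (getLeftChildIdx_bound a2 i2 lo)
      have hltR := pvFuelA_lt a1 a2 i1 i2 _ _ hguard
        (getRightChildIdx_bound a1 i1 hi) (getRightChildIdx_bound a2 i2 hi)
      rw [pvGoA_congr _ (pvFuelA a1 a2 (getLeftChildIdx a1 i1 lo) (getLeftChildIdx a2 i2 lo))
            a1 a2 _ _ lo (PySem.List.pyGetD a1 i1 0) (by omega) le_rfl,
          pvGoA_congr _ (pvFuelA a1 a2 (getRightChildIdx a1 i1 hi) (getRightChildIdx a2 i2 hi))
            a1 a2 _ _ (PySem.List.pyGetD a1 i1 0) hi (by omega) le_rfl]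

-- fuel-irrelevance for B's runner
lemma pvGoB_congr : ∀ (f g : Nat) (a1 a2 : List Int) (i1 i2 lo hi : Int),
    pvFuelB a1 a2 i1 i2 ≤ f → pvFuelB a1 a2 i1 i2 ≤ g →
    areSameAltGo f a1 a2 i1 i2 lo hi = areSameAltGo g a1 a2 i1 i2 lo hi := by
  intro f
  induction f with
  | zero =>
    intro g a1 a2 i1 i2 lo hi hf hg
    have hguard : i1 = -1 ∨ i2 = -1 := by
      by_contra hc
      unfold pvFuelB at hf
      rw [if_neg hc] at hf
      omega
    cases g with
    | zero => rfl
    | succ g =>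
      simp only [areSameAltGo]
      rw [if_pos hguard]
  | succ f ihf =>
    intro g a1 a2 i1 i2 lo hi hf hg
    by_cases hguard : i1 = -1 ∨ i2 = -1
    · cases g with
      | zero => simp only [areSameAltGo]; rw [if_pos hguard]
      | succ g => simp only [areSameAltGo]; rw [if_pos hguard, if_pos hguard]
    · cases g with
      | zero =>
        exfalso
        unfold pvFuelB at hg
        rw [if_neg hguard] at hg
        omega
      | succ g =>
        have hne1 : i1 ≠ -1 := fun h => hguard (Or.inl h)
        have hne2 : i2 ≠ -1 := fun h => hguard (Or.inr h)
        simp only [areSameAltGo]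
        rw [if_neg hguard, if_neg hguard]
        by_cases hv : PySem.List.pyGetD a1 i1 0 ≠ PySem.List.pyGetD a2 i2 0
        · rw [if_pos hv, if_pos hv]
        · rw [if_neg hv, if_neg hv]
          have hltL := pvFuelB_lt a1 a2
            ((PySem.List.slice a1 (some (i1 + 1)) none).filter
              (fun x => decide (lo ≤ x) && decide (x < PySem.List.pyGetD a1 i1 0)))
            ((PySem.List.slice a2 (some (i2 + 1)) none).filter
              (fun x => decide (lo ≤ x) && decide (x < PySem.List.pyGetD a1 i1 0)))
            i1 i2 hguard
            (pvSideBound a1 i1 _ hne1) (pvSideBound a2 i2 _ hne2)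
          have hltR := pvFuelB_lt a1 a2
            ((PySem.List.slice a1 (some (i1 + 1)) none).filter
              (fun x => decide (PySem.List.pyGetD a1 i1 0 ≤ x) && decide (x < hi)))
            ((PySem.List.slice a2 (some (i2 + 1)) none).filter
              (fun x => decide (PySem.List.pyGetD a1 i1 0 ≤ x) && decide (x < hi)))
            i1 i2 hguard
            (pvSideBound a1 i1 _ hne1) (pvSideBound a2 i2 _ hne2)
          rw [ihf g _ _ _ _ lo (PySem.List.pyGetD a1 i1 0) (by omega) (by omega),
              ihf g _ _ _ _ (PySem.List.pyGetD a1 i1 0) hi (by omega) (by omega)]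

-- one-step unfolding of B's port, exactly B's Python body
lemma areSame_alt_unfold (a1 a2 : List Int) (i1 i2 lo hi : Int) :
    areSame_alt a1 a2 i1 i2 lo hi =
      if i1 = -1 ∨ i2 = -1 then i1 == i2
      else if PySem.List.pyGetD a1 i1 0 ≠ PySem.List.pyGetD a2 i2 0 then false
      else
        areSame_alt
          ((PySem.List.slice a1 (some (i1 + 1)) none).filter
            (fun x => decide (lo ≤ x) && decide (x < PySem.List.pyGetD a1 i1 0)))
          ((PySem.List.slice a2 (some (i2 + 1)) none).filter
            (fun x => decide (lo ≤ x) && decide (x < PySem.List.pyGetD a1 i1 0)))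
          (if ((PySem.List.slice a1 (some (i1 + 1)) none).filter
            (fun x => decide (lo ≤ x) && decide (x < PySem.List.pyGetD a1 i1 0))).isEmpty then -1 else 0)
          (if ((PySem.List.slice a2 (some (i2 + 1)) none).filter
            (fun x => decide (lo ≤ x) && decide (x < PySem.List.pyGetD a1 i1 0))).isEmpty then -1 else 0)
          lo (PySem.List.pyGetD a1 i1 0) &&
        areSame_alt
          ((PySem.List.slice a1 (some (i1 + 1)) none).filter
            (fun x => decide (PySem.List.pyGetD a1 i1 0 ≤ x) && decide (x < hi)))
          ((PySem.List.slice a2 (some (i2 + 1)) none).filter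
            (fun x => decide (PySem.List.pyGetD a1 i1 0 ≤ x) && decide (x < hi)))
          (if ((PySem.List.slice a1 (some (i1 + 1)) none).filter
            (fun x => decide (PySem.List.pyGetD a1 i1 0 ≤ x) && decide (x < hi))).isEmpty then -1 else 0)
          (if ((PySem.List.slice a2 (some (i2 + 1)) none).filter
            (fun x => decide (PySem.List.pyGetD a1 i1 0 ≤ x) && decide (x < hi))).isEmpty then -1 else 0)
          (PySem.List.pyGetD a1 i1 0) hi := by
  by_cases hguard : i1 = -1 ∨ i2 = -1
  · rw [if_pos hguard]
    unfold areSame_alt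
    cases hm : pvFuelB a1 a2 i1 i2 with
    | zero => simp only [areSameAltGo]
    | succ m =>
      simp only [areSameAltGo]
      rw [if_pos hguard]
  · rw [if_neg hguard]
    have hne1 : i1 ≠ -1 := fun h => hguard (Or.inl h)
    have hne2 : i2 ≠ -1 := fun h => hguard (Or.inr h)
    have hm1 : pvFuelB a1 a2 i1 i2
        = a1.length + a2.length + (if i1 < 0 then 1 else 0) + (if i2 < 0 then 1 else 0) + 1 := by
      unfold pvFuelB
      rw [if_neg hguard]
    unfold areSame_alt
    rw [hm1]
    simp only [areSameAltGo]
    rw [if_neg hguard]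
    by_cases hv : PySem.List.pyGetD a1 i1 0 ≠ PySem.List.pyGetD a2 i2 0
    · rw [if_pos hv, if_pos hv]
    · rw [if_neg hv, if_neg hv]
      have hltL := pvFuelB_lt a1 a2
            ((PySem.List.slice a1 (some (i1 + 1)) none).filter
              (fun x => decide (lo ≤ x) && decide (x < PySem.List.pyGetD a1 i1 0)))
            ((PySem.List.slice a2 (some (i2 + 1)) none).filter
              (fun x => decide (lo ≤ x) && decide (x < PySem.List.pyGetD a1 i1 0)))
            i1 i2 hguard
            (pvSideBound a1 i1 _ hne1) (pvSideBound a2 i2 _ hne2)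
      have hltR := pvFuelB_lt a1 a2
            ((PySem.List.slice a1 (some (i1 + 1)) none).filter
              (fun x => decide (PySem.List.pyGetD a1 i1 0 ≤ x) && decide (x < hi)))
            ((PySem.List.slice a2 (some (i2 + 1)) none).filter
              (fun x => decide (PySem.List.pyGetD a1 i1 0 ≤ x) && decide (x < hi)))
            i1 i2 hguard
            (pvSideBound a1 i1 _ hne1) (pvSideBound a2 i2 _ hne2)
      rw [pvGoB_congr _ (pvFuelB _ _ _ _) _ _ _ _ lo (PySem.List.pyGetD a1 i1 0) (by omega) le_rfl,
          pvGoB_congr _ (pvFuelB _ _ _ _) _ _ _ _ (PySem.List.pyGetD a1 i1 0) hi (by omega) le_rfl]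

-- first scan of A's range loop vs head of B's filtered sublist
lemma pvScan (a : List Int) (p : Int → Bool) :
    ∀ (n s : Nat), a.length - s ≤ n →
      ((PySem.List.pyRange (s : Int) (a.length : Int) 1).find? (fun i => p (PySem.List.pyGetD a i 0)) = none
          ∧ (a.drop s).filter p = [])
      ∨ (∃ jn : Nat,
          (PySem.List.pyRange (s : Int) (a.length : Int) 1).find? (fun i => p (PySem.List.pyGetD a i 0)) = some (jn : Int)
          ∧ s ≤ jn ∧ jn < a.length ∧ p (a.getD jn 0) = true
          ∧ (a.drop s).filter p = a.getD jn 0 :: (a.drop (jn + 1)).filter p) := by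
  intro n
  induction n with
  | zero =>
      intro s h
      left
      rw [PySem.List.pyRange_one_eq_nil (by omega), List.drop_eq_nil_of_le (by omega)]
      simp
  | succ n ih =>
      intro s h
      by_cases hs : a.length ≤ s
      · left
        rw [PySem.List.pyRange_one_eq_nil (by omega), List.drop_eq_nil_of_le (by omega)]
        simp
      · have hslt : s < a.length := by omega
        rw [PySem.List.pyRange_one_cons (by omega : (s:Int) < (a.length:Int))]
        have hdrop : a.drop s = a.getD s 0 :: a.drop (s + 1) := by
          rw [List.drop_eq_getElem_cons hslt, List.getD_eq_getElem a 0 hslt]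
        have hget : PySem.List.pyGetD a (s : Int) 0 = a.getD s 0 := by
          rw [PySem.List.pyGetD_natCast a s 0]
        by_cases hp : p (a.getD s 0) = true
        · rw [List.find?_cons_of_pos (by rw [hget]; exact hp)]
          right
          exact ⟨s, rfl, le_refl s, hslt, hp, by rw [hdrop, List.filter_cons_of_pos hp]⟩
        · rw [List.find?_cons_of_neg (by rw [hget]; simpa using hp)]
          have hcast : ((s : Int) + 1) = ((s + 1 : Nat) : Int) := by push_cast; ring
          rw [hcast]
          have := ih (s + 1) (by omega)
          rcases this with ⟨hf, hfil⟩ | ⟨jn, hf, hsj, hjl, hpj, hfil⟩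
          · left
            refine ⟨hf, ?_⟩
            rw [hdrop, List.filter_cons_of_neg (by simpa using hp), hfil]
          · right
            refine ⟨jn, hf, by omega, hjl, hpj, ?_⟩
            rw [hdrop, List.filter_cons_of_neg (by simpa using hp), hfil]

-- characterisation of A's left-child scan against B's left partition
lemma pvLeft_spec (a : List Int) (k : Nat) (lo : Int) :
    (getLeftChildIdx a (k : Int) lo = -1
        ∧ (a.drop (k + 1)).filter (fun x => decide (lo ≤ x) && decide (x < a.getD k 0)) = [])
    ∨ (∃ jn : Nat, getLeftChildIdx a (k : Int) lo = (jn : Int) ∧ k + 1 ≤ jn ∧ jn < a.length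
        ∧ lo ≤ a.getD jn 0 ∧ a.getD jn 0 < a.getD k 0
        ∧ (a.drop (k + 1)).filter (fun x => decide (lo ≤ x) && decide (x < a.getD k 0))
            = a.getD jn 0 :: (a.drop (jn + 1)).filter (fun x => decide (lo ≤ x) && decide (x < a.getD k 0))) := by
  have hfc : ∀ (l : List Int),
      l.filter (fun v => decide (v < a.getD k 0) && decide (v ≥ lo))
        = l.filter (fun x => decide (lo ≤ x) && decide (x < a.getD k 0)) := by
    intro l
    exact List.filter_congr (fun x _ => by simp [ge_iff_le, Bool.and_comm])
  have hs := pvScan a (fun v => decide (v < a.getD k 0) && decide (v ≥ lo)) a.length (k + 1) (by omega)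
  unfold getLeftChildIdx
  rw [show ((k : Int) + 1) = ((k + 1 : Nat) : Int) by push_cast; ring]
  rw [PySem.List.pyGetD_natCast a k 0]
  rcases hs with ⟨hf, hfil⟩ | ⟨jn, hf, hsj, hjl, hpj, hfil⟩
  · left
    rw [hf, ← hfc]
    exact ⟨rfl, hfil⟩
  · right
    have hpj' : a.getD jn 0 < a.getD k 0 ∧ lo ≤ a.getD jn 0 := by simpa [ge_iff_le] using hpj
    exact ⟨jn, by rw [hf], hsj, hjl, hpj'.2, hpj'.1, by rw [← hfc, ← hfc, hfil]⟩

-- characterisation of A's right-child scan against B's right partition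
lemma pvRight_spec (a : List Int) (k : Nat) (hi : Int) :
    (getRightChildIdx a (k : Int) hi = -1
        ∧ (a.drop (k + 1)).filter (fun x => decide (a.getD k 0 ≤ x) && decide (x < hi)) = [])
    ∨ (∃ jn : Nat, getRightChildIdx a (k : Int) hi = (jn : Int) ∧ k + 1 ≤ jn ∧ jn < a.length
        ∧ a.getD k 0 ≤ a.getD jn 0 ∧ a.getD jn 0 < hi
        ∧ (a.drop (k + 1)).filter (fun x => decide (a.getD k 0 ≤ x) && decide (x < hi))
            = a.getD jn 0 :: (a.drop (jn + 1)).filter (fun x => decide (a.getD k 0 ≤ x) && decide (x < hi))) := by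
  have hfc : ∀ (l : List Int),
      l.filter (fun v => decide (v ≥ a.getD k 0) && decide (v < hi))
        = l.filter (fun x => decide (a.getD k 0 ≤ x) && decide (x < hi)) := by
    intro l
    exact List.filter_congr (fun x _ => by simp [ge_iff_le])
  have hs := pvScan a (fun v => decide (v ≥ a.getD k 0) && decide (v < hi)) a.length (k + 1) (by omega)
  unfold getRightChildIdx
  rw [show ((k : Int) + 1) = ((k + 1 : Nat) : Int) by push_cast; ring]
  rw [PySem.List.pyGetD_natCast a k 0]
  rcases hs with ⟨hf, hfil⟩ | ⟨jn, hf, hsj, hjl, hpj, hfil⟩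
  · left
    rw [hf, ← hfc]
    exact ⟨rfl, hfil⟩
  · right
    have hpj' : a.getD k 0 ≤ a.getD jn 0 ∧ a.getD jn 0 < hi := by simpa [ge_iff_le] using hpj
    exact ⟨jn, by rw [hf], hsj, hjl, hpj'.1, hpj'.2, by rw [← hfc, ← hfc, hfil]⟩

-- the linking relation: B's argument tuple (l, j) represents A's state (a, i) under bounds (lo, hi)
def pvLink (a : List Int) (i lo hi : Int) (l : List Int) (j : Int) : Prop :=
  (i = -1 ∧ l = [] ∧ j = -1) ∨
  (∃ k : Nat, i = (k : Int) ∧ k < a.length ∧ j = 0 ∧ lo ≤ a.getD k 0 ∧ a.getD k 0 < hi ∧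
    l = a.getD k 0 :: (a.drop (k + 1)).filter (fun x => decide (lo ≤ x) && decide (x < hi)))

-- child links produced by one step of A for the arguments B passes to its recursive calls
lemma pvChildLink_left (a : List Int) (k : Nat) (lo : Int) :
    pvLink a (getLeftChildIdx a (k : Int) lo) lo (a.getD k 0)
      ((a.drop (k + 1)).filter (fun x => decide (lo ≤ x) && decide (x < a.getD k 0)))
      (if ((a.drop (k + 1)).filter (fun x => decide (lo ≤ x) && decide (x < a.getD k 0))).isEmpty then -1 else 0) := by
  rcases pvLeft_spec a k lo with ⟨hc, hfil⟩ | ⟨jn, hc, hsj, hjl, hlo, hhi, hfil⟩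
  · left
    rw [hfil]
    exact ⟨hc, rfl, by simp⟩
  · right
    exact ⟨jn, hc, hjl, by rw [hfil]; simp, hlo, hhi, hfil⟩

lemma pvChildLink_right (a : List Int) (k : Nat) (hi : Int) :
    pvLink a (getRightChildIdx a (k : Int) hi) (a.getD k 0) hi
      ((a.drop (k + 1)).filter (fun x => decide (a.getD k 0 ≤ x) && decide (x < hi)))
      (if ((a.drop (k + 1)).filter (fun x => decide (a.getD k 0 ≤ x) && decide (x < hi))).isEmpty then -1 else 0) := by
  rcases pvRight_spec a k hi with ⟨hc, hfil⟩ | ⟨jn, hc, hsj, hjl, hlo, hhi, hfil⟩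
  · left
    rw [hfil]
    exact ⟨hc, rfl, by simp⟩
  · right
    exact ⟨jn, hc, hjl, by rw [hfil]; simp, hlo, hhi, hfil⟩

-- bounds on the scan results in the form pvFuelA_lt wants
lemma pvLeftBound (a : List Int) (k : Nat) (lo : Int) :
    getLeftChildIdx a (k : Int) lo = -1 ∨
      ((k : Int) < getLeftChildIdx a (k : Int) lo ∧ getLeftChildIdx a (k : Int) lo < (a.length : Int)) :=
  getLeftChildIdx_bound a (k : Int) lo

lemma pvRightBound (a : List Int) (k : Nat) (hi : Int) :
    getRightChildIdx a (k : Int) hi = -1 ∨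
      ((k : Int) < getRightChildIdx a (k : Int) hi ∧ getRightChildIdx a (k : Int) hi < (a.length : Int)) :=
  getRightChildIdx_bound a (k : Int) hi

-- collapsing B's nested filters one level down (child bounds refine the parent bounds)
lemma pvCollapseLeft (r : List Int) (lo c hi : Int) (hch : c ≤ hi) :
    r.filter (fun x => (decide (lo ≤ x) && decide (x < c)) && (decide (lo ≤ x) && decide (x < hi)))
      = r.filter (fun x => decide (lo ≤ x) && decide (x < c)) := by
  refine List.filter_congr (fun x _ => ?_)
  by_cases h1 : lo ≤ x
  · by_cases h2 : x < c
    · have h3 : x < hi := by omega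
      simp [h1, h2, h3]
    · simp [h2]
  · simp [h1]

lemma pvCollapseRight (r : List Int) (lo c hi : Int) (hcl : lo ≤ c) :
    r.filter (fun x => (decide (c ≤ x) && decide (x < hi)) && (decide (lo ≤ x) && decide (x < hi)))
      = r.filter (fun x => decide (c ≤ x) && decide (x < hi)) := by
  refine List.filter_congr (fun x _ => ?_)
  by_cases h1 : c ≤ x
  · by_cases h2 : x < hi
    · have h3 : lo ≤ x := by omega
      simp [h1, h2, h3]
    · simp [h2]
  · simp [h1]

-- main lemma: A on (a, i) equals B on the linked argument tuple (l, j)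
lemma pvMain : ∀ (n : Nat) (a1 a2 : List Int) (i1 i2 lo hi : Int) (l1 l2 : List Int) (j1 j2 : Int),
    pvFuelA a1 a2 i1 i2 ≤ n → pvLink a1 i1 lo hi l1 j1 → pvLink a2 i2 lo hi l2 j2 →
    areSame a1 a2 i1 i2 lo hi = areSame_alt l1 l2 j1 j2 lo hi := by
  intro n
  induction n using Nat.strong_induction_on with
  | _ n ih =>
  intro a1 a2 i1 i2 lo hi l1 l2 j1 j2 hm h1 h2
  rcases h1 with ⟨e1, el1, ej1⟩ | ⟨k1, e1, hk1, ej1, hlo1, hhi1, el1⟩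
  · rcases h2 with ⟨e2, el2, ej2⟩ | ⟨k2, e2, hk2, ej2, hlo2, hhi2, el2⟩
    · subst e1 el1 ej1 e2 el2 ej2
      rw [areSame_unfold, areSame_alt_unfold]
      simp
    · subst e1 el1 ej1 e2 ej2 el2
      rw [areSame_unfold, areSame_alt_unfold]
      rw [if_pos (Or.inl rfl), if_pos (Or.inl rfl)]
      have hA : ((-1 : Int) == (k2 : Int)) = false := by
        simp only [beq_eq_false_iff_ne]
        omega
      rw [hA]
      decide
  · rcases h2 with ⟨e2, el2, ej2⟩ | ⟨k2, e2, hk2, ej2, hlo2, hhi2, el2⟩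
    · subst e1 ej1 el1 e2 el2 ej2
      rw [areSame_unfold, areSame_alt_unfold]
      rw [if_pos (Or.inr rfl), if_pos (Or.inr rfl)]
      have hA : (((k1 : Int)) == (-1 : Int)) = false := by
        simp only [beq_eq_false_iff_ne]
        omega
      rw [hA]
      decide
    · subst e1 ej1 el1 e2 ej2 el2
      rw [areSame_unfold, areSame_alt_unfold]
      have hg1 : ¬((k1 : Int) = -1 ∨ (k2 : Int) = -1) := by
        rintro (h | h) <;> omega
      have hg2 : ¬((0 : Int) = -1 ∨ (0 : Int) = -1) := by decide
      rw [if_neg hg1, if_neg hg2]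
      simp only [PySem.List.pyGetD_natCast, PySem.List.pyGetD_zero_cons]
      by_cases hv : a1.getD k1 0 = a2.getD k2 0
      · rw [if_neg (not_ne_iff.mpr hv), if_neg (not_ne_iff.mpr hv)]
        have hslice : ∀ (x : Int) (xs : List Int),
            PySem.List.slice (x :: xs) (some ((0 : Int) + 1)) none = xs := by
          intro x xs
          norm_num [PySem.List.slice_from_one]
        simp only [hslice]
        rw [List.filter_filter, List.filter_filter, List.filter_filter, List.filter_filter]
        rw [pvCollapseLeft _ lo (a1.getD k1 0) hi (by omega),
            pvCollapseLeft _ lo (a1.getD k1 0) hi (by omega),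
            pvCollapseRight _ lo (a1.getD k1 0) hi (by omega),
            pvCollapseRight _ lo (a1.getD k1 0) hi (by omega)]
        have L1 := pvChildLink_left a1 k1 lo
        have R1 := pvChildLink_right a1 k1 hi
        have L2 := pvChildLink_left a2 k2 lo
        have R2 := pvChildLink_right a2 k2 hi
        rw [← hv] at L2 R2
        have hmL : pvFuelA a1 a2 (getLeftChildIdx a1 (k1 : Int) lo) (getLeftChildIdx a2 (k2 : Int) lo) < n :=
          lt_of_lt_of_le (pvFuelA_lt a1 a2 (k1 : Int) (k2 : Int) _ _ hg1
            (pvLeftBound a1 k1 lo) (pvLeftBound a2 k2 lo)) hm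
        have hmR : pvFuelA a1 a2 (getRightChildIdx a1 (k1 : Int) hi) (getRightChildIdx a2 (k2 : Int) hi) < n :=
          lt_of_lt_of_le (pvFuelA_lt a1 a2 (k1 : Int) (k2 : Int) _ _ hg1
            (pvRightBound a1 k1 hi) (pvRightBound a2 k2 hi)) hm
        have hL := ih _ hmL a1 a2 _ _ lo (a1.getD k1 0) _ _ _ _ le_rfl L1 L2
        have hR := ih _ hmR a1 a2 _ _ (a1.getD k1 0) hi _ _ _ _ le_rfl R1 R2
        rw [hL, hR]
      · rw [if_pos hv, if_pos hv]

-- ===== VERDICT (by name: the statement is the Claim_ definition above) =====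
theorem areSame_spec : Claim_equal_areSame := by
  unfold Claim_equal_areSame
  intro a1 a2 i1 i2 lo hi hdom hpre
  unfold Spec_areSame
  rcases hpre with ⟨hp1, hp2⟩
  by_cases hg : i1 = -1 ∨ i2 = -1
  · rw [areSame_unfold, areSame_alt_unfold, if_pos hg, if_pos hg]
  · have hne1 : i1 ≠ -1 := fun h => hg (Or.inl h)
    have hne2 : i2 ≠ -1 := fun h => hg (Or.inr h)
    rcases hp1 with h | ⟨h01, hl1⟩
    · exact absurd h hne1
    rcases hp2 with h | ⟨h02, hl2⟩
    · exact absurd h hne2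
    obtain ⟨k1, rfl⟩ : ∃ k : Nat, i1 = (k : Int) := ⟨i1.toNat, by omega⟩
    obtain ⟨k2, rfl⟩ : ∃ k : Nat, i2 = (k : Int) := ⟨i2.toNat, by omega⟩
    have hk1 : k1 < a1.length := by omega
    have hk2 : k2 < a2.length := by omega
    rw [areSame_unfold, areSame_alt_unfold, if_neg hg, if_neg hg]
    simp only [PySem.List.pyGetD_natCast]
    by_cases hv : a1.getD k1 0 = a2.getD k2 0
    · rw [if_neg (not_ne_iff.mpr hv), if_neg (not_ne_iff.mpr hv)]
      have hs1 : PySem.List.slice a1 (some ((k1 : Int) + 1)) none = a1.drop (k1 + 1) := by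
        rw [show ((k1 : Int) + 1) = ((k1 + 1 : Nat) : Int) by push_cast; ring,
            PySem.List.slice_from_natCast]
      have hs2 : PySem.List.slice a2 (some ((k2 : Int) + 1)) none = a2.drop (k2 + 1) := by
        rw [show ((k2 : Int) + 1) = ((k2 + 1 : Nat) : Int) by push_cast; ring,
            PySem.List.slice_from_natCast]
      rw [hs1, hs2]
      have L1 := pvChildLink_left a1 k1 lo
      have R1 := pvChildLink_right a1 k1 hi
      have L2 := pvChildLink_left a2 k2 lo
      have R2 := pvChildLink_right a2 k2 hi
      rw [← hv] at L2 R2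
      have hL := pvMain _ a1 a2 _ _ lo (a1.getD k1 0) _ _ _ _ le_rfl L1 L2
      have hR := pvMain _ a1 a2 _ _ (a1.getD k1 0) hi _ _ _ _ le_rfl R1 R2
      rw [hL, hR]
    · rw [if_pos hv, if_pos hv]
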